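-- pv_equiv track=rewrite | github.com/moredrowsy/leetcode | 0598-zombie-in-matrix.py | zombie
-- ===== SOURCE A (Python) =====
-- from collections import deque
--
-- def zombie(grid):
--     """
--     Time Complexity
--     ---------------
--     O(n)
--
--     Space Complexity
--     ----------------
--     O(n)
--     """
--     if not grid or not grid[0]:
--         return -1
--
--     n, m = len(grid), len(grid[0])
--
--     if n == 0 or m == 0:
--         return -1
--
--     human = 0
--     zombie = 1
--     directions = [(0, -1), (0, 1), (-1, 0), (1, 0)]
--
--     # Each node is a tuple of (x, y)
--     queue = deque([])
--     for x in range(n):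
--         for y in range(m):
--             if grid[x][y] == zombie:
--                 queue.append((x, y))
--
--     days = 0
--     while queue:
--         days += 1
--         q_size = len(queue)
--
--         for _ in range(q_size):
--             x, y = queue.popleft()
--
--             for dx, dy in directions:
--                 next_x, next_y = x + dx, y + dy
--
--                 if next_x >= 0 and next_x < n and \
--                         next_y >= 0 and next_y < m and \
--                         grid[next_x][next_y] == human:
--                     grid[next_x][next_y] = zombie
--                     queue.append((next_x, next_y))
--
--     for x in range(n):
--         for y in range(m):
--             if grid[x][y] == 0:
--                 return -1
--
--     return days - 1
-- ===== SOURCE B (Python) =====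
-- def zombie(grid):
--     if not grid or not grid[0]:
--         return -1
--     n, m = len(grid), len(grid[0])
--     if not any(grid[x][y] == 1 for x in range(n) for y in range(m)):
--         return -1  # no zombie anywhere: the infection can never be completed
--     days = 0
--     while True:
--         frontier = [(x, y)
--                     for x in range(n) for y in range(m)
--                     if grid[x][y] == 0 and any(
--                         0 <= x + dx < n and 0 <= y + dy < m and grid[x + dx][y + dy] == 1
--                         for dx, dy in ((0, -1), (0, 1), (-1, 0), (1, 0)))]
--         if not frontier:
--             break
--         for x, y in frontier:
--             grid[x][y] = 1
--         days += 1
--     if any(grid[x][y] == 0 for x in range(n) for y in range(m)):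
--         return -1
--     return days
-- ===== Notes on version B (the rewrite author's own statement) =====
-- stated objective: alternative
-- what changed: Replaces the deque-based level BFS with a queue-free day-by-day simulation: each pass rescans the whole grid, collects every human cell orthogonally adjacent to a zombie, then flips them all at once and counts the pass; an up-front 'no zombie anywhere' check replaces A's days-1 accounting.
import Mathlib
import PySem

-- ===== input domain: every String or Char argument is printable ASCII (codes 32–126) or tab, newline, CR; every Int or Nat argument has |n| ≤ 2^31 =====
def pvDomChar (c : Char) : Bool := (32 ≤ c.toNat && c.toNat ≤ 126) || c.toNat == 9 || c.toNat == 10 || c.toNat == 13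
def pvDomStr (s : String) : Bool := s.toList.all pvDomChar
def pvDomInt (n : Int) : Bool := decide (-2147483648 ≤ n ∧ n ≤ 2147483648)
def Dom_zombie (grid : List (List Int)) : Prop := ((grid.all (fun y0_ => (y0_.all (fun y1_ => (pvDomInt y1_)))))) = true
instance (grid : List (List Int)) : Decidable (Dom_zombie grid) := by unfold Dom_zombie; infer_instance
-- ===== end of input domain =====

-- B replaces A's deque-based level BFS by a queue-free day-by-day simulation (rescan the
-- grid each day, flip the whole frontier of humans adjacent to a zombie at once).
-- Python note: both A and B mutate the caller's grid identically (every reachable human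
-- cell is set to 1); the theorems below are about the return value.

-- shared low-level grid access (Python's grid[x][y] read / write, used only behind bounds checks)
def pvCell (g : List (List Int)) (x y : Int) : Int :=
  (g.getD x.toNat []).getD y.toNat 0

def pvSet (g : List (List Int)) (x y : Int) (v : Int) : List (List Int) :=
  g.set x.toNat ((g.getD x.toNat []).set y.toNat v)

def pvDirs : List (Int × Int) := [(0, -1), (0, 1), (-1, 0), (1, 0)]

-- ===== PORT A =====
-- one neighbour candidate of the popped queue cell: infect if in bounds and human
def stepCandA (n m : Int) (st : List (List Int) × List (Int × Int)) (c : Int × Int) :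
    List (List Int) × List (Int × Int) :=
  if 0 ≤ c.1 ∧ c.1 < n ∧ 0 ≤ c.2 ∧ c.2 < m ∧ pvCell st.1 c.1 c.2 = 0 then
    (pvSet st.1 c.1 c.2 1, st.2 ++ [c])
  else st

def popA (n m : Int) (st : List (List Int) × List (Int × Int)) (p : Int × Int) :
    List (List Int) × List (Int × Int) :=
  pvDirs.foldl (fun st d => stepCandA n m st (p.1 + d.1, p.2 + d.2)) st

-- the 'while queue' loop, one level (q_size pops) per iteration; fuel is only for
-- termination (it is always large enough, proved below)
def bfsA (n m : Int) : Nat → List (List Int) → List (Int × Int) → Int → List (List Int) × Int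
  | 0, g, _q, days => (g, days)
  | fuel + 1, g, q, days =>
    if q = [] then (g, days)
    else
      let r := q.foldl (popA n m) (g, [])
      bfsA n m fuel r.1 r.2 (days + 1)

def zombie (grid : List (List Int)) : Int :=
  if grid = [] ∨ grid.headD [] = [] then -1
  else
    let n : Int := grid.length
    let m : Int := (grid.headD []).length
    if n = 0 ∨ m = 0 then -1
    else
      let queue : List (Int × Int) :=
        (PySem.List.pyRange 0 n 1).foldl (fun q x =>
          (PySem.List.pyRange 0 m 1).foldl (fun q y =>
            if pvCell grid x y = 1 then q ++ [(x, y)] else q) q) []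
      let fuel := grid.foldl (fun a row => a + row.length) 0 + 1
      let r := bfsA n m fuel grid queue 0
      if ∃ x ∈ PySem.List.pyRange 0 n 1, ∃ y ∈ PySem.List.pyRange 0 m 1, pvCell r.1 x y = 0
      then -1
      else r.2 - 1

-- ===== PORT B =====
-- one day's frontier: every human cell with a zombie orthogonal neighbour (row-major scan)
def collectB (n m : Int) (g : List (List Int)) : List (Int × Int) :=
  (PySem.List.pyRange 0 n 1).foldl (fun acc x =>
    (PySem.List.pyRange 0 m 1).foldl (fun acc y =>
      if pvCell g x y = 0 ∧ ∃ d ∈ pvDirs, 0 ≤ x + d.1 ∧ x + d.1 < n ∧ 0 ≤ y + d.2 ∧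
          y + d.2 < m ∧ pvCell g (x + d.1) (y + d.2) = 1
      then acc ++ [(x, y)] else acc) acc) []

-- the 'while True' loop: flip the whole frontier at once, count the day; fuel is only
-- for termination (it is always large enough, proved below)
def simB (n m : Int) : Nat → List (List Int) → Int → List (List Int) × Int
  | 0, g, days => (g, days)
  | fuel + 1, g, days =>
    let fr := collectB n m g
    if fr = [] then (g, days)
    else simB n m fuel (fr.foldl (fun g c => pvSet g c.1 c.2 1) g) (days + 1)

def zombie_alt (grid : List (List Int)) : Int :=
  if grid = [] ∨ grid.headD [] = [] then -1
  else
    let n : Int := grid.length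
    let m : Int := (grid.headD []).length
    if ∃ x ∈ PySem.List.pyRange 0 n 1, ∃ y ∈ PySem.List.pyRange 0 m 1, pvCell grid x y = 1
    then
      let fuel := grid.foldl (fun a row => a + row.length) 0 + 1
      let r := simB n m fuel grid 0
      if ∃ x ∈ PySem.List.pyRange 0 n 1, ∃ y ∈ PySem.List.pyRange 0 m 1, pvCell r.1 x y = 0
      then -1
      else r.2
    else -1

-- ===== PRECONDITION & SPEC =====
-- Pre_ excludes exactly the ragged grids having a row shorter than row 0, on which the
-- Python A raises IndexError during its initial scan (it indexes every row up to len(grid[0])).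
def Pre_zombie (grid : List (List Int)) : Prop :=
  ∀ row ∈ grid, (grid.headD []).length ≤ row.length
instance (grid : List (List Int)) : Decidable (Pre_zombie grid) := by
  unfold Pre_zombie; infer_instance

def pvWitness_zombie : List (List Int) := [[1, 0], [0, 0]]

def Spec_zombie (grid : List (List Int)) (out : Int) : Prop := out = zombie_alt grid
instance (grid : List (List Int)) (out : Int) : Decidable (Spec_zombie grid out) := by
  unfold Spec_zombie; infer_instance

-- ===== CLAIM (what is proved, stated in full; the proofs are below) =====
def Claim_equal_zombie : Prop :=
  ∀ (grid : List (List Int)), Dom_zombie grid → Pre_zombie grid → Spec_zombie grid (zombie grid)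

-- ===== LEMMAS AND PROOFS =====

def RangeC (g : List (List Int)) (x y : Int) : Prop :=
  0 ≤ x ∧ x < (g.length : Int) ∧ 0 ≤ y ∧ y < (((g.getD x.toNat []).length : Int))

theorem getD_set_eq {α} (g : List α) (a : Nat) (r d : α) (h : a < g.length) :
    (g.set a r).getD a d = r := by
  rw [List.getD_eq_getElem?_getD, List.getElem?_set_self (by simpa using h)]
  rfl

theorem getD_set_ne {α} (g : List α) {a i : Nat} (r d : α) (h : i ≠ a) :
    (g.set a r).getD i d = g.getD i d := by
  rw [List.getD_eq_getElem?_getD, List.getElem?_set_ne (Ne.symm h), ← List.getD_eq_getElem?_getD]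

theorem getD_set_oob {α} (g : List α) {a : Nat} (r d : α) (h : g.length ≤ a) :
    (g.set a r).getD a d = g.getD a d := by
  rw [List.set_eq_of_length_le h]

theorem length_pvSet (g : List (List Int)) (x y v : Int) : (pvSet g x y v).length = g.length := by
  simp [pvSet]

theorem rowlen_pvSet (g : List (List Int)) (x y v : Int) (i : Nat) :
    ((pvSet g x y v).getD i []).length = (g.getD i []).length := by
  unfold pvSet
  by_cases hx : i = x.toNat
  · subst hx
    rcases Nat.lt_or_ge x.toNat g.length with h | h
    · rw [getD_set_eq _ _ _ _ h]; simp
    · rw [getD_set_oob _ _ _ h]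
  · rw [getD_set_ne _ _ _ hx]

theorem pvCell_set_self {g : List (List Int)} {x y : Int} (v : Int) (h : RangeC g x y) :
    pvCell (pvSet g x y v) x y = v := by
  obtain ⟨hx0, hxn, hy0, hym⟩ := h
  have hx : x.toNat < g.length := by omega
  have hy : y.toNat < (g.getD x.toNat []).length := by omega
  unfold pvCell pvSet
  rw [getD_set_eq _ _ _ _ hx, getD_set_eq _ _ _ _ hy]

theorem pvCell_set_other {g : List (List Int)} {x y x' y' : Int} (v : Int)
    (hx0 : 0 ≤ x) (hy0 : 0 ≤ y) (hx0' : 0 ≤ x') (hy0' : 0 ≤ y')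
    (hne : (x, y) ≠ (x', y')) :
    pvCell (pvSet g x y v) x' y' = pvCell g x' y' := by
  unfold pvCell pvSet
  by_cases hx : x'.toNat = x.toNat
  · have hxx : x' = x := by omega
    have hyy : y'.toNat ≠ y.toNat := by
      have : y' ≠ y := by rintro rfl; exact hne (by rw [hxx])
      omega
    rcases Nat.lt_or_ge x.toNat g.length with h | h
    · rw [hx, getD_set_eq _ _ _ _ h, List.getD_eq_getElem?_getD,
        List.getElem?_set_ne (Ne.symm hyy), ← List.getD_eq_getElem?_getD]
    · rw [hx, getD_set_oob _ _ _ h]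
  · rw [getD_set_ne _ _ _ hx]

-- extensionality
theorem grid_ext {g₁ g₂ : List (List Int)} (hlen : g₁.length = g₂.length)
    (hrow : ∀ i : Nat, (g₁.getD i []).length = (g₂.getD i []).length)
    (hcell : ∀ x y : Int, RangeC g₁ x y → pvCell g₁ x y = pvCell g₂ x y) : g₁ = g₂ := by
  apply List.ext_getElem hlen
  intro i h1 h2
  apply List.ext_getElem
  · have := hrow i
    rwa [List.getD_eq_getElem?_getD, List.getElem?_eq_getElem h1,
      List.getD_eq_getElem?_getD, List.getElem?_eq_getElem h2] at this
  intro j hj1 hj2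
  have hc := hcell (i : Int) (j : Int) ?_
  · unfold pvCell at hc
    have e1 : g₁.getD i [] = g₁[i] := by
      simp [List.getD_eq_getElem?_getD, List.getElem?_eq_getElem h1]
    have e2 : g₂.getD i [] = g₂[i] := by
      simp [List.getD_eq_getElem?_getD, List.getElem?_eq_getElem h2]
    rw [Int.toNat_natCast, Int.toNat_natCast, e1, e2] at hc
    rwa [List.getD_eq_getElem?_getD, List.getElem?_eq_getElem hj1,
      List.getD_eq_getElem?_getD, List.getElem?_eq_getElem hj2] at hc
  · refine ⟨by positivity, by exact_mod_cast h1, by positivity, ?_⟩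
    rw [Int.toNat_natCast]
    have e1 : g₁.getD i [] = g₁[i] := by
      simp [List.getD_eq_getElem?_getD, List.getElem?_eq_getElem h1]
    rw [e1]; exact_mod_cast hj1

def InW (n m : Int) (c : Int × Int) : Prop := 0 ≤ c.1 ∧ c.1 < n ∧ 0 ≤ c.2 ∧ c.2 < m

def AdjP (p c : Int × Int) : Prop := ∃ d ∈ pvDirs, c = (p.1 + d.1, p.2 + d.2)

def WOK (n m : Int) (g : List (List Int)) : Prop :=
  n = (g.length : Int) ∧ 0 ≤ m ∧ ∀ i : Nat, i < g.length → m ≤ ((g.getD i []).length : Int)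

def ShEq (g₁ g₂ : List (List Int)) : Prop :=
  g₁.length = g₂.length ∧ ∀ i : Nat, (g₁.getD i []).length = (g₂.getD i []).length

def Hset (n m : Int) (g : List (List Int)) (c : Int × Int) : Prop :=
  InW n m c ∧ pvCell g c.1 c.2 = 0 ∧
    ∃ z, InW n m z ∧ AdjP c z ∧ pvCell g z.1 z.2 = 1

def SInv (n m : Int) (g₀ : List (List Int)) (st : List (List Int) × List (Int × Int)) : Prop :=
  ShEq g₀ st.1 ∧
  (∀ c ∈ st.2, InW n m c ∧ pvCell g₀ c.1 c.2 = 0) ∧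
  (∀ x y, RangeC g₀ x y →
    (((x, y) ∈ st.2 → pvCell st.1 x y = 1) ∧ ((x, y) ∉ st.2 → pvCell st.1 x y = pvCell g₀ x y)))

theorem shEq_refl (g : List (List Int)) : ShEq g g := ⟨rfl, fun _ => rfl⟩

theorem shEq_trans {g₁ g₂ g₃ : List (List Int)} (h : ShEq g₁ g₂) (h' : ShEq g₂ g₃) :
    ShEq g₁ g₃ := ⟨h.1.trans h'.1, fun i => (h.2 i).trans (h'.2 i)⟩

theorem shEq_pvSet (g : List (List Int)) (x y v : Int) : ShEq g (pvSet g x y v) :=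
  ⟨(length_pvSet g x y v).symm, fun i => (rowlen_pvSet g x y v i).symm⟩

theorem rangeC_congr {g₁ g₂ : List (List Int)} (h : ShEq g₁ g₂) (x y : Int) :
    RangeC g₁ x y ↔ RangeC g₂ x y := by
  unfold RangeC; rw [h.1, h.2 x.toNat]

theorem wok_congr {n m : Int} {g₁ g₂ : List (List Int)} (h : ShEq g₁ g₂) (hw : WOK n m g₁) :
    WOK n m g₂ := by
  obtain ⟨h1, h2⟩ := h
  exact ⟨by rw [hw.1, h1], hw.2.1, fun i hi => by rw [← h2 i]; exact hw.2.2 i (by omega)⟩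

theorem inW_rangeC {n m : Int} {g : List (List Int)} (hw : WOK n m g) {c : Int × Int}
    (h : InW n m c) : RangeC g c.1 c.2 := by
  obtain ⟨h1, h2, h3⟩ := hw
  obtain ⟨a, b, cc, d⟩ := h
  refine ⟨a, by omega, cc, ?_⟩
  have := h3 c.1.toNat (by omega)
  omega

theorem stepCand_lemma {n m : Int} {g₀ : List (List Int)}
    {st : List (List Int) × List (Int × Int)} (c : Int × Int)
    (hw : WOK n m g₀) (h : SInv n m g₀ st) :
    SInv n m g₀ (stepCandA n m st c) ∧
    (∀ e ∈ (stepCandA n m st c).2, e ∈ st.2 ∨ e = c) ∧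
    (∀ e ∈ st.2, e ∈ (stepCandA n m st c).2) ∧
    (InW n m c → pvCell g₀ c.1 c.2 = 0 → c ∈ (stepCandA n m st c).2) := by
  obtain ⟨hsh, hmem, hcells⟩ := h
  unfold stepCandA
  split_ifs with hcond
  · obtain ⟨hc1, hc2, hc3, hc4, hc0⟩ := hcond
    have hinw : InW n m c := ⟨hc1, hc2, hc3, hc4⟩
    have hr : RangeC g₀ c.1 c.2 := inW_rangeC hw hinw
    have hr' : RangeC st.1 c.1 c.2 := (rangeC_congr hsh c.1 c.2).mp hr
    have hnotin : c ∉ st.2 := by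
      intro hin
      have := (hcells c.1 c.2 hr).1 (by simpa using hin)
      omega
    have hg0 : pvCell g₀ c.1 c.2 = 0 := by
      have := (hcells c.1 c.2 hr).2 (by simpa using hnotin)
      omega
    refine ⟨⟨shEq_trans hsh (shEq_pvSet _ _ _ _), ?_, ?_⟩, ?_, ?_, ?_⟩
    · intro e he
      rcases List.mem_append.mp he with he | he
      · exact hmem e he
      · simp only [List.mem_singleton] at he; subst he; exact ⟨hinw, hg0⟩
    · intro x y hxy
      have hxy' : RangeC st.1 x y := (rangeC_congr hsh x y).mp hxy
      constructor
      · intro hin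
        rcases List.mem_append.mp hin with hin | hin
        · by_cases hec : (x, y) = c
          · rw [show x = c.1 from congrArg Prod.fst hec, show y = c.2 from congrArg Prod.snd hec]
            exact pvCell_set_self _ hr'
          · rw [pvCell_set_other _ hc1 hc3 hxy.1 hxy.2.2.1 (fun h' => hec h'.symm)]
            exact (hcells x y hxy).1 hin
        · simp only [List.mem_singleton] at hin; subst hin
          exact pvCell_set_self _ hr'
      · intro hnin
        have h1 : (x, y) ∉ st.2 := fun h' => hnin (List.mem_append.mpr (Or.inl h'))
        have h2 : (x, y) ≠ c := fun h' => hnin (List.mem_append.mpr (Or.inr (by simp [h'])))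
        rw [pvCell_set_other _ hc1 hc3 hxy.1 hxy.2.2.1 (fun h' => h2 h'.symm)]
        exact (hcells x y hxy).2 h1
    · intro e he
      rcases List.mem_append.mp he with he | he
      · exact Or.inl he
      · simp only [List.mem_singleton] at he; exact Or.inr he
    · intro e he; exact List.mem_append.mpr (Or.inl he)
    · intro _ _; exact List.mem_append.mpr (Or.inr (by simp))
  · simp only [not_and] at hcond
    refine ⟨⟨hsh, hmem, hcells⟩, fun e he => Or.inl he, fun e he => he, ?_⟩
    intro hinw hg0
    obtain ⟨hc1, hc2, hc3, hc4⟩ := hinw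
    by_cases hin : c ∈ st.2
    · exact hin
    · exfalso
      have hr : RangeC g₀ c.1 c.2 := inW_rangeC hw ⟨hc1, hc2, hc3, hc4⟩
      have := (hcells c.1 c.2 hr).2 (by simpa using hin)
      have := hcond hc1 hc2 hc3 hc4
      omega

theorem popAux {n m : Int} {g₀ : List (List Int)} (p : Int × Int) (hw : WOK n m g₀) :
    ∀ (ds : List (Int × Int)) (st : List (List Int) × List (Int × Int)), SInv n m g₀ st →
    SInv n m g₀ (ds.foldl (fun st d => stepCandA n m st (p.1 + d.1, p.2 + d.2)) st) ∧
    (∀ e ∈ (ds.foldl (fun st d => stepCandA n m st (p.1 + d.1, p.2 + d.2)) st).2,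
      e ∈ st.2 ∨ ∃ d ∈ ds, e = (p.1 + d.1, p.2 + d.2)) ∧
    (∀ e ∈ st.2, e ∈ (ds.foldl (fun st d => stepCandA n m st (p.1 + d.1, p.2 + d.2)) st).2) ∧
    (∀ d ∈ ds, InW n m (p.1 + d.1, p.2 + d.2) → pvCell g₀ (p.1 + d.1) (p.2 + d.2) = 0 →
      (p.1 + d.1, p.2 + d.2) ∈ (ds.foldl (fun st d => stepCandA n m st (p.1 + d.1, p.2 + d.2)) st).2)
  | [], st, h => ⟨h, fun e he => Or.inl he, fun e he => he, by simp⟩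
  | d :: ds, st, h => by
    obtain ⟨h1, h2, h3, h4⟩ := stepCand_lemma (p.1 + d.1, p.2 + d.2) hw h
    obtain ⟨ih1, ih2, ih3, ih4⟩ := popAux p hw ds (stepCandA n m st (p.1 + d.1, p.2 + d.2)) h1
    simp only [List.foldl_cons]
    refine ⟨ih1, ?_, ?_, ?_⟩
    · intro e he
      rcases ih2 e he with he' | ⟨d', hd', he'⟩
      · rcases h2 e he' with he'' | he''
        · exact Or.inl he''
        · exact Or.inr ⟨d, by simp, he''⟩
      · exact Or.inr ⟨d', by simp [hd'], he'⟩
    · intro e he; exact ih3 e (h3 e he)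
    · intro d' hd' hiw hc0
      rcases List.mem_cons.mp hd' with rfl | hd'
      · exact ih3 _ (h4 hiw hc0)
      · exact ih4 d' hd' hiw hc0

theorem roundAux {n m : Int} {g₀ : List (List Int)} (hw : WOK n m g₀) :
    ∀ (q : List (Int × Int)) (st : List (List Int) × List (Int × Int)), SInv n m g₀ st →
    SInv n m g₀ (q.foldl (popA n m) st) ∧
    (∀ e ∈ (q.foldl (popA n m) st).2, e ∈ st.2 ∨ ∃ p ∈ q, AdjP p e) ∧
    (∀ e ∈ st.2, e ∈ (q.foldl (popA n m) st).2) ∧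
    (∀ p ∈ q, ∀ c, InW n m c → pvCell g₀ c.1 c.2 = 0 → AdjP p c → c ∈ (q.foldl (popA n m) st).2)
  | [], st, h => ⟨h, fun e he => Or.inl he, fun e he => he, by simp⟩
  | p :: q, st, h => by
    obtain ⟨h1, h2, h3, h4⟩ := popAux p hw pvDirs st h
    obtain ⟨ih1, ih2, ih3, ih4⟩ := roundAux hw q (popA n m st p) h1
    simp only [List.foldl_cons]
    refine ⟨ih1, ?_, ?_, ?_⟩
    · intro e he
      rcases ih2 e he with he' | ⟨p', hp', he'⟩
      · rcases h2 e he' with he'' | ⟨d, hd, he''⟩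
        · exact Or.inl he''
        · exact Or.inr ⟨p, by simp, d, hd, he''⟩
      · exact Or.inr ⟨p', by simp [hp'], he'⟩
    · intro e he; exact ih3 e (h3 e he)
    · intro p' hp' c hiw hc0 hadj
      rcases List.mem_cons.mp hp' with rfl | hp'
      · obtain ⟨d, hd, rfl⟩ := hadj
        exact ih3 _ (h4 d hd hiw hc0)
      · exact ih4 p' hp' c hiw hc0 hadj

def QInv (n m : Int) (g : List (List Int)) (q : List (Int × Int)) : Prop :=
  (∀ c ∈ q, InW n m c ∧ pvCell g c.1 c.2 = 1) ∧
  (∀ c, Hset n m g c → ∃ p ∈ q, AdjP p c)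

theorem adjP_symm {p c : Int × Int} (h : AdjP p c) : AdjP c p := by
  obtain ⟨d, hd, rfl⟩ := h
  simp only [pvDirs, List.mem_cons, List.not_mem_nil, or_false] at hd
  rcases hd with rfl | rfl | rfl | rfl
  · exact ⟨(0, 1), by simp [pvDirs], by simp⟩
  · exact ⟨(0, -1), by simp [pvDirs], by simp⟩
  · exact ⟨(1, 0), by simp [pvDirs], by simp⟩
  · exact ⟨(-1, 0), by simp [pvDirs], by simp⟩

theorem sinv_init (n m : Int) (g : List (List Int)) : SInv n m g (g, []) :=
  ⟨shEq_refl g, by simp, fun x y _ => ⟨by simp, fun _ => rfl⟩⟩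

theorem round_mem {n m : Int} {g : List (List Int)} (hw : WOK n m g) {q : List (Int × Int)}
    (hq : QInv n m g q) (c : Int × Int) :
    c ∈ (q.foldl (popA n m) (g, ([] : List (Int × Int)))).2 ↔ Hset n m g c := by
  obtain ⟨hinv, hsound, _, hcomp⟩ := roundAux hw q (g, []) (sinv_init n m g)
  constructor
  · intro hc
    obtain ⟨hiw, h0⟩ := hinv.2.1 c hc
    rcases hsound c hc with h | ⟨p, hp, hadj⟩
    · simp at h
    · obtain ⟨hpw, hp1⟩ := hq.1 p hp
      exact ⟨hiw, h0, p, hpw, adjP_symm hadj, hp1⟩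
  · intro hc
    obtain ⟨p, hp, hadj⟩ := hq.2 c hc
    exact hcomp p hp c hc.1 hc.2.1 hadj

theorem mem_foldl_app_ite {α γ : Type} (P : α → Prop) [DecidablePred P] (f : α → γ)
    (L : List α) (acc : List γ) (c : γ) :
    c ∈ L.foldl (fun acc x => if P x then acc ++ [f x] else acc) acc ↔
      c ∈ acc ∨ ∃ x ∈ L, P x ∧ c = f x := by
  rw [PySem.List.foldl_append_ite]
  simp [List.mem_filter, eq_comm, and_assoc]

theorem mem_winfold (n m : Int) (P : Int → Int → Prop) [inst : ∀ x y, Decidable (P x y)]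
    (c : Int × Int) :
    c ∈ (PySem.List.pyRange 0 n 1).foldl (fun acc x =>
        (PySem.List.pyRange 0 m 1).foldl (fun acc y =>
          if P x y then acc ++ [(x, y)] else acc) acc) ([] : List (Int × Int)) ↔
      0 ≤ c.1 ∧ c.1 < n ∧ 0 ≤ c.2 ∧ c.2 < m ∧ P c.1 c.2 := by
  have houter : ∀ (L : List Int) (acc : List (Int × Int)),
      c ∈ L.foldl (fun acc x =>
        (PySem.List.pyRange 0 m 1).foldl (fun acc y =>
          if P x y then acc ++ [(x, y)] else acc) acc) acc ↔
      c ∈ acc ∨ ∃ x ∈ L, 0 ≤ c.2 ∧ c.2 < m ∧ P x c.2 ∧ c.1 = x := by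
    intro L
    induction L with
    | nil => intro acc; simp
    | cons x L ih =>
      intro acc
      rw [List.foldl_cons, ih, mem_foldl_app_ite (P := fun y => P x y) (f := fun y => (x, y))]
      simp only [PySem.List.mem_pyRange_one, List.mem_cons]
      constructor
      · rintro ((h | ⟨y, hy, hP, rfl⟩) | ⟨x', hx', h1, h2, hP, hx⟩)
        · exact Or.inl h
        · exact Or.inr ⟨x, Or.inl rfl, hy.1, hy.2, hP, rfl⟩
        · exact Or.inr ⟨x', Or.inr hx', h1, h2, hP, hx⟩
      · rintro (h | ⟨x', hx'mem, h1, h2, hP, hx⟩)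
        · exact Or.inl (Or.inl h)
        · rcases hx'mem with rfl | hx'
          · exact Or.inl (Or.inr ⟨c.2, ⟨h1, h2⟩, hP, Prod.ext_iff.mpr ⟨hx, rfl⟩⟩)
          · exact Or.inr ⟨x', hx', h1, h2, hP, hx⟩
  rw [houter]
  simp only [List.not_mem_nil, false_or]
  constructor
  · rintro ⟨x, hx, h1, h2, hP, rfl⟩
    have := PySem.List.mem_pyRange_one.mp hx
    exact ⟨by omega, by omega, h1, h2, hP⟩
  · rintro ⟨h1, h2, h3, h4, hP⟩
    exact ⟨c.1, PySem.List.mem_pyRange_one.mpr (by omega), h3, h4, hP, rfl⟩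

theorem mem_collectB {n m : Int} {g : List (List Int)} (c : Int × Int) :
    c ∈ collectB n m g ↔ Hset n m g c := by
  unfold collectB
  rw [mem_winfold]
  unfold Hset InW AdjP
  constructor
  · rintro ⟨h1, h2, h3, h4, h0, d, hd, hb1, hb2, hb3, hb4, hcell⟩
    exact ⟨⟨h1, h2, h3, h4⟩, h0,
      (c.1 + d.1, c.2 + d.2), ⟨hb1, hb2, hb3, hb4⟩, ⟨d, hd, rfl⟩, hcell⟩
  · rintro ⟨⟨h1, h2, h3, h4⟩, h0, z, ⟨hb1, hb2, hb3, hb4⟩, ⟨d, hd, rfl⟩, hcell⟩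
    exact ⟨h1, h2, h3, h4, h0, d, hd, hb1, hb2, hb3, hb4, hcell⟩

theorem flip_fold {n m : Int} (F : List (Int × Int)) :
    ∀ (g : List (List Int)), (∀ c ∈ F, InW n m c) → WOK n m g →
    ShEq g (F.foldl (fun g c => pvSet g c.1 c.2 1) g) ∧
    (∀ x y, RangeC g x y →
      (((x, y) ∈ F → pvCell (F.foldl (fun g c => pvSet g c.1 c.2 1) g) x y = 1) ∧
       ((x, y) ∉ F → pvCell (F.foldl (fun g c => pvSet g c.1 c.2 1) g) x y = pvCell g x y))) := by
  induction F with
  | nil => exact fun g _ _ => ⟨shEq_refl g, fun x y _ => ⟨by simp, fun _ => rfl⟩⟩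
  | cons c F ih =>
    intro g hF hw
    simp only [List.foldl_cons]
    have hcw : InW n m c := hF c (by simp)
    have hr : RangeC g c.1 c.2 := inW_rangeC hw hcw
    have hsh1 : ShEq g (pvSet g c.1 c.2 1) := shEq_pvSet g c.1 c.2 1
    obtain ⟨ihsh, ihcells⟩ := ih (pvSet g c.1 c.2 1) (fun e he => hF e (by simp [he]))
      (wok_congr hsh1 hw)
    refine ⟨shEq_trans hsh1 ihsh, ?_⟩
    intro x y hxy
    have hxy1 : RangeC (pvSet g c.1 c.2 1) x y := (rangeC_congr hsh1 x y).mp hxy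
    constructor
    · intro hin
      rcases List.mem_cons.mp hin with rfl | hin
      · by_cases hin' : (x, y) ∈ F
        · exact (ihcells x y hxy1).1 hin'
        · rw [(ihcells x y hxy1).2 hin']
          exact pvCell_set_self 1 hr
      · exact (ihcells x y hxy1).1 hin
    · intro hnin
      have h1 : (x, y) ≠ c := fun h => hnin (by simp [h])
      have h2 : (x, y) ∉ F := fun h => hnin (by simp [h])
      rw [(ihcells x y hxy1).2 h2]
      exact pvCell_set_other 1 hcw.1 hcw.2.2.1 hxy.1 hxy.2.2.1 (fun h => h1 h.symm)

theorem countP_lt_aux {α : Type} (p q : α → Bool) :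
    ∀ (l : List α), (∀ a ∈ l, q a = true → p a = true) →
    ∀ c ∈ l, p c = true → q c = false → l.countP q < l.countP p := by
  intro l
  induction l with
  | nil => simp
  | cons a l ih =>
    intro h c hc hp hq
    have hmono : l.countP q ≤ l.countP p := by
      apply List.countP_mono_left
      intro b hb; exact h b (by simp [hb])
    rcases List.mem_cons.mp hc with rfl | hc
    · simp [hp, hq]
      omega
    · have := ih (fun b hb => h b (by simp [hb])) c hc hp hq
      simp only [List.countP_cons]
      split_ifs with h1 h2 <;>
        first
          | omega
          | (exfalso; have := h a (by simp) (by simpa using h1); simp_all)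

def wlist (n m : Int) : List (Int × Int) :=
  (List.range n.toNat).flatMap (fun i => (List.range m.toNat).map (fun j => (Int.ofNat i, Int.ofNat j)))

def Zc (n m : Int) (g : List (List Int)) : Nat :=
  (wlist n m).countP (fun c => decide (pvCell g c.1 c.2 = 0))

theorem mem_wlist {n m : Int} (c : Int × Int) : c ∈ wlist n m ↔ InW n m c := by
  unfold wlist InW
  rw [List.mem_flatMap]
  constructor
  · rintro ⟨i, hi, hc⟩
    rw [List.mem_map] at hc
    obtain ⟨j, hj, rfl⟩ := hc
    rw [List.mem_range] at hi hj
    simp only [Int.ofNat_eq_natCast]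
    exact ⟨by omega, by omega, by omega, by omega⟩
  · rintro ⟨h1, h2, h3, h4⟩
    refine ⟨c.1.toNat, List.mem_range.mpr (by omega), ?_⟩
    rw [List.mem_map]
    refine ⟨c.2.toNat, List.mem_range.mpr (by omega), ?_⟩
    simp only [Int.ofNat_eq_natCast]
    exact Prod.ext_iff.mpr ⟨Int.toNat_of_nonneg h1, Int.toNat_of_nonneg h3⟩
theorem length_wlist (n m : Int) : (wlist n m).length = n.toNat * m.toNat := by
  unfold wlist
  rw [List.length_flatMap]
  simp

theorem zc_decrease {n m : Int} {g g' : List (List Int)} (F : List (Int × Int))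
    (hw : WOK n m g) (_hsh : ShEq g g')
    (hcells : ∀ x y, RangeC g x y →
      (((x, y) ∈ F → pvCell g' x y = 1) ∧ ((x, y) ∉ F → pvCell g' x y = pvCell g x y)))
    (hFm : ∀ c ∈ F, InW n m c ∧ pvCell g c.1 c.2 = 0) (hne : F ≠ []) :
    Zc n m g' < Zc n m g := by
  obtain ⟨c₀, hc₀⟩ := List.exists_mem_of_ne_nil F hne
  obtain ⟨hc₀w, hc₀0⟩ := hFm c₀ hc₀
  apply countP_lt_aux _ _ (wlist n m)
  · intro a ha hq
    have haw : InW n m a := (mem_wlist a).mp ha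
    have har : RangeC g a.1 a.2 := inW_rangeC hw haw
    by_cases hain : (a.1, a.2) ∈ F
    · have := (hcells a.1 a.2 har).1 hain
      simp only [decide_eq_true_eq] at hq
      omega
    · have := (hcells a.1 a.2 har).2 hain
      simp only [decide_eq_true_eq] at hq ⊢
      omega
  · exact (mem_wlist c₀).mpr hc₀w
  · simpa using hc₀0
  · have har : RangeC g c₀.1 c₀.2 := inW_rangeC hw hc₀w
    have := (hcells c₀.1 c₀.2 har).1 (by simpa using hc₀)
    simp only [decide_eq_false_iff_not]
    omega

theorem round_step {n m : Int} {g : List (List Int)} {q : List (Int × Int)}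
    (hw : WOK n m g) (hq : QInv n m g q) :
    (q.foldl (popA n m) (g, ([] : List (Int × Int)))).1 =
      (collectB n m g).foldl (fun g c => pvSet g c.1 c.2 1) g ∧
    ((q.foldl (popA n m) (g, ([] : List (Int × Int)))).2 = [] ↔ collectB n m g = []) ∧
    QInv n m (q.foldl (popA n m) (g, ([] : List (Int × Int)))).1
      (q.foldl (popA n m) (g, ([] : List (Int × Int)))).2 ∧
    WOK n m (q.foldl (popA n m) (g, ([] : List (Int × Int)))).1 ∧
    (collectB n m g ≠ [] →
      Zc n m (q.foldl (popA n m) (g, ([] : List (Int × Int)))).1 < Zc n m g) := by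
  set r := q.foldl (popA n m) (g, ([] : List (Int × Int))) with hr
  obtain ⟨hinv, _, _, _⟩ := roundAux hw q (g, []) (sinv_init n m g)
  rw [← hr] at hinv
  obtain ⟨hsh, hmem, hcells⟩ := hinv
  have hmemr : ∀ c, c ∈ r.2 ↔ Hset n m g c := round_mem hw hq
  have hmemF : ∀ c, c ∈ collectB n m g ↔ Hset n m g c := fun c => mem_collectB c
  have hFw : ∀ c ∈ collectB n m g, InW n m c := fun c hc => ((hmemF c).mp hc).1
  obtain ⟨hshB, hcellsB⟩ := flip_fold (collectB n m g) g hFw hw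
  have hgeq : r.1 = (collectB n m g).foldl (fun g c => pvSet g c.1 c.2 1) g := by
    apply grid_ext
    · rw [← hsh.1, ← hshB.1]
    · intro i; rw [← hsh.2 i, ← hshB.2 i]
    · intro x y hxy
      have hxy0 : RangeC g x y := (rangeC_congr hsh x y).mpr hxy
      by_cases hin : Hset n m g (x, y)
      · rw [(hcells x y hxy0).1 ((hmemr (x, y)).mpr hin),
          (hcellsB x y hxy0).1 ((hmemF (x, y)).mpr hin)]
      · rw [(hcells x y hxy0).2 (fun h => hin ((hmemr (x, y)).mp h)),
          (hcellsB x y hxy0).2 (fun h => hin ((hmemF (x, y)).mp h))]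
  have hemp : (r.2 = [] ↔ collectB n m g = []) := by
    rw [List.eq_nil_iff_forall_not_mem, List.eq_nil_iff_forall_not_mem]
    constructor
    · intro h c hc; exact h c ((hmemr c).mpr ((hmemF c).mp hc))
    · intro h c hc; exact h c ((hmemF c).mpr ((hmemr c).mp hc))
  have hwok' : WOK n m r.1 := wok_congr hsh hw
  refine ⟨hgeq, hemp, ⟨?_, ?_⟩, hwok', ?_⟩
  · intro c hc
    obtain ⟨hcw, _⟩ := hmem c hc
    exact ⟨hcw, (hcells c.1 c.2 (inW_rangeC hw hcw)).1 (by simpa using hc)⟩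
  · intro c hcset
    obtain ⟨hcw, hc0, z, hzw, hadj, hz1⟩ := hcset
    have hcr : RangeC g c.1 c.2 := inW_rangeC hw hcw
    have hcnot : c ∉ r.2 := by
      intro h
      have := (hcells c.1 c.2 hcr).1 (by simpa using h)
      omega
    have hcg0 : pvCell g c.1 c.2 = 0 := by
      have := (hcells c.1 c.2 hcr).2 (by simpa using hcnot)
      omega
    by_cases hzin : z ∈ r.2
    · exact ⟨z, hzin, adjP_symm hadj⟩
    · exfalso
      have hzr : RangeC g z.1 z.2 := inW_rangeC hw hzw
      have hzg1 : pvCell g z.1 z.2 = 1 := by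
        have := (hcells z.1 z.2 hzr).2 (by simpa using hzin)
        omega
      exact hcnot ((hmemr c).mpr ⟨hcw, hcg0, z, hzw, hadj, hzg1⟩)
  · intro hne
    have hne' : r.2 ≠ [] := fun h => hne (hemp.mp h)
    exact zc_decrease r.2 hw hsh (fun x y hxy => hcells x y hxy)
      (fun c hc => hmem c hc) hne'

theorem collectB_wok {n m : Int} {g : List (List Int)} (hw : WOK n m g) :
    WOK n m ((collectB n m g).foldl (fun g c => pvSet g c.1 c.2 1) g) :=
  wok_congr (flip_fold (collectB n m g) g (fun c hc => ((mem_collectB c).mp hc).1) hw).1 hw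

theorem collectB_zc {n m : Int} {g : List (List Int)} (hw : WOK n m g)
    (hne : collectB n m g ≠ []) :
    Zc n m ((collectB n m g).foldl (fun g c => pvSet g c.1 c.2 1) g) < Zc n m g := by
  obtain ⟨hsh, hcells⟩ :=
    flip_fold (collectB n m g) g (fun c hc => ((mem_collectB c).mp hc).1) hw
  exact zc_decrease _ hw hsh hcells
    (fun c hc => ⟨((mem_collectB c).mp hc).1, ((mem_collectB c).mp hc).2.1⟩) hne

theorem simB_fuel {n m : Int} :
    ∀ (f f' : Nat) (g : List (List Int)) (d : Int), WOK n m g →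
      Zc n m g < f → Zc n m g < f' → simB n m f g d = simB n m f' g d := by
  intro f
  induction f with
  | zero => intro f' g d _ h _; omega
  | succ fa ih =>
    intro f' g d hw h h'
    match f' with
    | 0 => omega
    | fb + 1 =>
      simp only [simB]
      by_cases hF : collectB n m g = []
      · rw [if_pos hF, if_pos hF]
      · rw [if_neg hF, if_neg hF]
        exact ih fb _ _ (collectB_wok hw)
          (by have := collectB_zc hw hF; omega) (by have := collectB_zc hw hF; omega)

theorem bfsA_nil {n m : Int} (f : Nat) (g : List (List Int)) (d : Int) :
    bfsA n m f g [] d = (g, d) := by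
  cases f with
  | zero => rfl
  | succ f => simp [bfsA]

theorem main_bfs_sim {n m : Int} :
    ∀ (f : Nat) (g : List (List Int)) (q : List (Int × Int)) (d : Int),
      WOK n m g → QInv n m g q → q ≠ [] → Zc n m g < f →
      bfsA n m (f + 1) g q d = ((simB n m f g d).1, (simB n m f g d).2 + 1) := by
  intro f
  induction f with
  | zero => intro g q d _ _ _ h; omega
  | succ fa ih =>
    intro g q d hw hq hqne hz
    obtain ⟨hgeq, hemp, hqinv', hwok', hdec⟩ := round_step hw hq
    have ebfs : bfsA n m (fa + 1 + 1) g q d =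
        if q = [] then (g, d)
        else bfsA n m (fa + 1) (q.foldl (popA n m) (g, [])).1
          (q.foldl (popA n m) (g, [])).2 (d + 1) := rfl
    have esim : simB n m (fa + 1) g d =
        if collectB n m g = [] then (g, d)
        else simB n m fa ((collectB n m g).foldl (fun g c => pvSet g c.1 c.2 1) g) (d + 1) :=
      rfl
    rw [ebfs, if_neg hqne, esim]
    by_cases hF : collectB n m g = []
    · rw [if_pos hF]
      have hr2 : (q.foldl (popA n m) (g, ([] : List (Int × Int)))).2 = [] := hemp.mpr hF
      have hr1 : (q.foldl (popA n m) (g, ([] : List (Int × Int)))).1 = g := by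
        rw [hgeq, hF]; rfl
      rw [hr1, hr2, bfsA_nil]
    · rw [if_neg hF]
      have hr2ne : (q.foldl (popA n m) (g, ([] : List (Int × Int)))).2 ≠ [] :=
        fun h => hF (hemp.mp h)
      have hzc2 : Zc n m (q.foldl (popA n m) (g, ([] : List (Int × Int)))).1 < fa := by
        have := hdec hF; omega
      rw [ih _ _ (d + 1) hwok' hqinv' hr2ne hzc2, hgeq]

theorem exists_win_iff (n m : Int) (P : Int → Int → Prop) :
    (∃ x ∈ PySem.List.pyRange 0 n 1, ∃ y ∈ PySem.List.pyRange 0 m 1, P x y) ↔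
      ∃ c : Int × Int, 0 ≤ c.1 ∧ c.1 < n ∧ 0 ≤ c.2 ∧ c.2 < m ∧ P c.1 c.2 := by
  constructor
  · rintro ⟨x, hx, y, hy, h⟩
    rw [PySem.List.mem_pyRange_one] at hx hy
    exact ⟨(x, y), hx.1, hx.2, hy.1, hy.2, h⟩
  · rintro ⟨c, h1, h2, h3, h4, h⟩
    exact ⟨c.1, PySem.List.mem_pyRange_one.mpr ⟨h1, h2⟩, c.2,
      PySem.List.mem_pyRange_one.mpr ⟨h3, h4⟩, h⟩

theorem sum_len_ge (k : Nat) :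
    ∀ (L : List (List Int)), (∀ r ∈ L, k ≤ r.length) → L.length * k ≤ (L.map List.length).sum := by
  intro L
  induction L with
  | nil => simp
  | cons r L ih =>
    intro h
    have h1 := h r (by simp)
    have h2 := ih (fun s hs => h s (by simp [hs]))
    simp only [List.map_cons, List.sum_cons, List.length_cons, Nat.succ_mul]
    omega

theorem zombie_eq (grid : List (List Int)) (hpre : Pre_zombie grid) :
    zombie grid = zombie_alt grid := by
  by_cases h0 : grid = [] ∨ grid.headD [] = []
  · simp only [zombie, zombie_alt, if_pos h0]
  · simp only [zombie, zombie_alt, if_neg h0]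
    have hne : grid ≠ [] := fun h => h0 (Or.inl h)
    have hhd : grid.headD [] ≠ [] := fun h => h0 (Or.inr h)
    have hn0 : (grid.length : Int) ≠ 0 := by
      simpa using fun h => hne (List.length_eq_zero_iff.mp h)
    have hm0 : ((grid.headD []).length : Int) ≠ 0 := by
      simpa using fun h => hhd (List.length_eq_zero_iff.mp h)
    rw [if_neg (by rintro (h | h) <;> [exact hn0 h; exact hm0 h])]
    have hwok : WOK (grid.length : Int) ((grid.headD []).length : Int) grid := by
      refine ⟨rfl, by positivity, ?_⟩
      intro i hi
      have hmem : grid.getD i [] ∈ grid := by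
        rw [List.getD_eq_getElem?_getD, List.getElem?_eq_getElem hi]
        exact List.getElem_mem hi
      exact_mod_cast hpre (grid.getD i []) hmem
    have hq : ∀ c : Int × Int,
        (c ∈ (PySem.List.pyRange 0 (grid.length : Int) 1).foldl (fun q x =>
          (PySem.List.pyRange 0 ((grid.headD []).length : Int) 1).foldl (fun q y =>
            if pvCell grid x y = 1 then q ++ [(x, y)] else q) q) [] ↔
          0 ≤ c.1 ∧ c.1 < (grid.length : Int) ∧ 0 ≤ c.2 ∧
            c.2 < ((grid.headD []).length : Int) ∧ pvCell grid c.1 c.2 = 1) :=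
      fun c => mem_winfold _ _ (fun x y => pvCell grid x y = 1) c
    by_cases hex : ∃ x ∈ PySem.List.pyRange 0 (grid.length : Int) 1,
        ∃ y ∈ PySem.List.pyRange 0 ((grid.headD []).length : Int) 1, pvCell grid x y = 1
    · rw [if_pos hex]
      have hqne : (PySem.List.pyRange 0 (grid.length : Int) 1).foldl (fun q x =>
          (PySem.List.pyRange 0 ((grid.headD []).length : Int) 1).foldl (fun q y =>
            if pvCell grid x y = 1 then q ++ [(x, y)] else q) q) [] ≠ [] := by
        obtain ⟨c, hc⟩ := (exists_win_iff _ _ _).mp hex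
        intro h
        have := (hq c).mpr hc
        rw [h] at this
        simp at this
      have hqinv : QInv (grid.length : Int) ((grid.headD []).length : Int) grid
          ((PySem.List.pyRange 0 (grid.length : Int) 1).foldl (fun q x =>
            (PySem.List.pyRange 0 ((grid.headD []).length : Int) 1).foldl (fun q y =>
              if pvCell grid x y = 1 then q ++ [(x, y)] else q) q) []) := by
        constructor
        · intro c hc
          obtain ⟨h1, h2, h3, h4, h5⟩ := (hq c).mp hc
          exact ⟨⟨h1, h2, h3, h4⟩, h5⟩
        · rintro c ⟨hcw, hc0, z, hzw, hadj, hz1⟩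
          exact ⟨z, (hq z).mpr ⟨hzw.1, hzw.2.1, hzw.2.2.1, hzw.2.2.2, hz1⟩, adjP_symm hadj⟩
      have hzc : Zc (grid.length : Int) ((grid.headD []).length : Int) grid <
          grid.foldl (fun a row => a + row.length) 0 := by
        obtain ⟨c, hc1, hc2, hc3, hc4, hc5⟩ := (exists_win_iff _ _ _).mp hex
        have hlt : Zc (grid.length : Int) ((grid.headD []).length : Int) grid <
            (wlist (grid.length : Int) ((grid.headD []).length : Int)).length := by
          have := countP_lt_aux (fun _ => true)
            (fun c => decide (pvCell grid c.1 c.2 = 0))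
            (wlist (grid.length : Int) ((grid.headD []).length : Int))
            (fun a _ _ => rfl) c ((mem_wlist c).mpr ⟨hc1, hc2, hc3, hc4⟩) rfl
            (by simp [hc5])
          simpa [Zc, List.countP_true] using this
        have hle : (wlist (grid.length : Int) ((grid.headD []).length : Int)).length ≤
            grid.foldl (fun a row => a + row.length) 0 := by
          rw [length_wlist, PySem.List.foldl_add_nat (g := List.length)]
          have := sum_len_ge (grid.headD []).length grid (fun r hr => hpre r hr)
          simpa using this
        omega
      rw [main_bfs_sim _ grid _ 0 hwok hqinv hqne hzc,
        simB_fuel (grid.foldl (fun a row => a + row.length) 0 + 1)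
          (grid.foldl (fun a row => a + row.length) 0) grid 0 hwok (by omega) hzc]
      by_cases hfin : ∃ x ∈ PySem.List.pyRange 0 (grid.length : Int) 1,
          ∃ y ∈ PySem.List.pyRange 0 ((grid.headD []).length : Int) 1,
          pvCell (simB (grid.length : Int) ((grid.headD []).length : Int)
            (grid.foldl (fun a row => a + row.length) 0) grid 0).1 x y = 0
      · rw [if_pos hfin, if_pos hfin]
      · rw [if_neg hfin, if_neg hfin]
        omega
    · rw [if_neg hex]
      have hqe : (PySem.List.pyRange 0 (grid.length : Int) 1).foldl (fun q x =>
          (PySem.List.pyRange 0 ((grid.headD []).length : Int) 1).foldl (fun q y =>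
            if pvCell grid x y = 1 then q ++ [(x, y)] else q) q) [] = [] := by
        rw [List.eq_nil_iff_forall_not_mem]
        intro c hc
        obtain ⟨h1, h2, h3, h4, h5⟩ := (hq c).mp hc
        exact hex ((exists_win_iff _ _ _).mpr ⟨c, h1, h2, h3, h4, h5⟩)
      rw [hqe, bfsA_nil]
      split_ifs <;> norm_num

-- ===== VERDICT (by name: the statement is the Claim_ definition above) =====
theorem zombie_spec : Claim_equal_zombie := by
  intro grid _ hpre
  unfold Spec_zombie
  exact zombie_eq grid hpre
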